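-- pv_equiv track=rewrite | github.com/jerryli27/NewMaster | context_ratio_util.py | count_key_phrases_around_context_in_preprocessed_sentence
-- ===== SOURCE A (Python) =====
-- from collections import Counter
--
-- def count_key_phrases_around_context_in_preprocessed_sentence(sen, key_phrase_set, context):
--     # type: (str, Set[str]) -> List[int]
--     # Because the sentence should be pre_processed, words, phrases and punctuations are separated by space.
--     """
--     TODO:change def
--     :param sen: A preprocessed sentence that possibly contains one or more key phrases.
--     :param key_phrase_set: A set of key phrases.
--     :return: The sorted indices of the key phrases in the sentence.
--     """
--     num_words_in_context = len(context)
--     words = sen.split(' ')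
--     len_sentence = len(words)
--     key_phrase_count = Counter()
--     key_phrase_count_before_context = Counter()
--     key_phrase_count_after_context = Counter()
--     key_phrase_count_around_context = Counter()
--     for i, word in enumerate(words):
--         if word in key_phrase_set:
--             key_phrase_count[word] = key_phrase_count.get(word,0) + 1
--             # Check if context occurs before key phrase.
--             if i >= num_words_in_context:
--                 success = True
--                 for context_word_i, context_word in enumerate(context):
--                     if words[i - num_words_in_context + context_word_i] != context_word:
--                         success = False
--                         break
--                 if success:
--                     key_phrase_count_after_context[word] = key_phrase_count_after_context.get(word,0) + 1
--                     key_phrase_count_around_context[word] = key_phrase_count_around_context.get(word,0) + 1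
--
--             # Check if context occurs after key phrase.
--             if i < len_sentence - num_words_in_context:
--                 success = True
--                 for context_word_i, context_word in enumerate(context):
--                     if words[i + 1 + context_word_i] != context_word:
--                         success = False
--                         break
--                 if success:
--                     key_phrase_count_before_context[word] = key_phrase_count_before_context.get(word,0) + 1
--                     key_phrase_count_around_context[word] = key_phrase_count_around_context.get(word,0) + 1
--
--     return key_phrase_count, key_phrase_count_around_context, key_phrase_count_before_context, key_phrase_count_after_context
-- ===== SOURCE B (Python) =====
-- from collections import Counter
--
-- def count_key_phrases_around_context_in_preprocessed_sentence(sen, key_phrase_set, context):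
--     # One pass: precompute a table of all positions where the context matches,
--     # then each key-phrase occurrence only does O(1) table lookups.
--     words = sen.split(' ')
--     n = len(words)
--     m = len(context)
--     ctx_at = [words[j:j + m] == context for j in range(n - m + 1)]
--     total = Counter()
--     around = Counter()
--     before = Counter()
--     after = Counter()
--     for i, w in enumerate(words):
--         if w in key_phrase_set:
--             total[w] += 1
--             b = i >= m and ctx_at[i - m]
--             a = i + m < n and ctx_at[i + 1]
--             if b:
--                 after[w] += 1
--             if a:
--                 before[w] += 1
--             if b or a:
--                 around[w] += 2 if (b and a) else 1
--     return total, around, before, after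
-- ===== Notes on version B (the rewrite author's own statement) =====
-- stated objective: alternative
-- what changed: B precomputes one table of all context-match positions (slice comparison per position) and replaces A's per-occurrence inner matching loops by O(1) table lookups, merging the two 'around' increments into a single update.
import Mathlib
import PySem

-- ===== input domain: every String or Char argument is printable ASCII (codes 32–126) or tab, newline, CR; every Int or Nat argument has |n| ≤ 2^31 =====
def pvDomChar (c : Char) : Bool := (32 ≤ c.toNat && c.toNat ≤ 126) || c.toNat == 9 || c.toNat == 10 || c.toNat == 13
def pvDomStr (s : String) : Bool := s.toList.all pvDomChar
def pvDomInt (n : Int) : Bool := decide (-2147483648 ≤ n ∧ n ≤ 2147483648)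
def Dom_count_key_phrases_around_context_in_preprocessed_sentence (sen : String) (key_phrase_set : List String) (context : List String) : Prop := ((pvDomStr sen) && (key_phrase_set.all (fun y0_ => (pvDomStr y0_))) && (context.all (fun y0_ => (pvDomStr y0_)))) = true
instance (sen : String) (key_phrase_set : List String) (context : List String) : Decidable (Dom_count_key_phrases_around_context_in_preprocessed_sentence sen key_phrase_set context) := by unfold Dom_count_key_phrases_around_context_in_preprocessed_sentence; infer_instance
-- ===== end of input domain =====

-- B replaces A's per-occurrence inner context-matching loops by one precomputed table of
-- context-match positions with O(1) lookups per key-phrase occurrence (alternative algorithm, same cost class).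


-- the quadruple of counters (count, around, before, after)
abbrev PVQuad := PySem.Dict String Int × PySem.Dict String Int × PySem.Dict String Int × PySem.Dict String Int

-- ===== PORT A =====
-- inner loop 'for context_word_i, context_word in enumerate(context): if words[start+k] != cw: success=False; break'
-- (the index start+k is always in range under A's guards, so pyGet? never returns none there)
def pvCtxLoopA (words : List String) (start : Int) : Int → List String → Bool
  | _, [] => true
  | k, cw :: rest =>
    if PySem.List.pyGet? words (start + k) ≠ some cw then false
    else pvCtxLoopA words start (k + 1) rest

-- the body of A's 'for i, word in enumerate(words)' loop
def pvStepA (words key_phrase_set context : List String) (m n : Int) (st : PVQuad) (p : Int × String) : PVQuad :=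
  let i := p.1
  let word := p.2
  if word ∈ key_phrase_set then
    let kc := st.1.insert word (st.1.getD word 0 + 1)
    let st1 : PVQuad :=
      if m ≤ i then
        if pvCtxLoopA words (i - m) 0 context then
          (kc, st.2.1.insert word (st.2.1.getD word 0 + 1), st.2.2.1,
           st.2.2.2.insert word (st.2.2.2.getD word 0 + 1))
        else (kc, st.2)
      else (kc, st.2)
    if i < n - m then
      if pvCtxLoopA words (i + 1) 0 context then
        (st1.1, st1.2.1.insert word (st1.2.1.getD word 0 + 1),
         st1.2.2.1.insert word (st1.2.2.1.getD word 0 + 1), st1.2.2.2)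
      else st1
    else st1
  else st

def count_key_phrases_around_context_in_preprocessed_sentence (sen : String) (key_phrase_set : List String) (context : List String) : (List (String × Int)) × (List (String × Int)) × (List (String × Int)) × (List (String × Int)) :=
  let num_words_in_context : Int := context.length
  let words : List String := (PySem.Str.split? sen " ").getD []  -- sep " " is nonempty: split? is always some
  let len_sentence : Int := words.length
  let r : PVQuad := (PySem.List.enumerate words 0).foldl
    (pvStepA words key_phrase_set context num_words_in_context len_sentence)
    (PySem.Dict.empty, PySem.Dict.empty, PySem.Dict.empty, PySem.Dict.empty)
  (r.1.items, r.2.1.items, r.2.2.1.items, r.2.2.2.items)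

-- ===== PORT B =====
-- the body of B's single counting loop; ctxAt is the precomputed match table
-- (ctx_at[i-m] / ctx_at[i+1] are in range whenever the left conjunct holds, so pyGetD's default never fires)
def pvStepB (key_phrase_set : List String) (ctxAt : List Bool) (m n : Int) (st : PVQuad) (p : Int × String) : PVQuad :=
  let i := p.1
  let w := p.2
  if w ∈ key_phrase_set then
    let tot := st.1.modify w 0 (· + 1)
    let b := decide (m ≤ i) && PySem.List.pyGetD ctxAt (i - m) false
    let a := decide (i + m < n) && PySem.List.pyGetD ctxAt (i + 1) false
    let aft := if b then st.2.2.2.modify w 0 (· + 1) else st.2.2.2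
    let bef := if a then st.2.2.1.modify w 0 (· + 1) else st.2.2.1
    let arnd := if b || a then st.2.1.modify w 0 (· + (if b && a then 2 else 1)) else st.2.1
    (tot, arnd, bef, aft)
  else st

def count_key_phrases_around_context_in_preprocessed_sentence_alt (sen : String) (key_phrase_set : List String) (context : List String) : (List (String × Int)) × (List (String × Int)) × (List (String × Int)) × (List (String × Int)) :=
  let words : List String := (PySem.Str.split? sen " ").getD []  -- sep " " is nonempty: split? is always some
  let n : Int := words.length
  let m : Int := context.length
  let ctxAt : List Bool := (PySem.List.pyRange 0 (n - m + 1) 1).map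
    (fun j => PySem.List.slice words (some j) (some (j + m)) == context)
  let r : PVQuad := (PySem.List.enumerate words 0).foldl
    (pvStepB key_phrase_set ctxAt m n)
    (PySem.Dict.empty, PySem.Dict.empty, PySem.Dict.empty, PySem.Dict.empty)
  (r.1.items, r.2.1.items, r.2.2.1.items, r.2.2.2.items)

-- ===== PRECONDITION & SPEC =====
def Spec_count_key_phrases_around_context_in_preprocessed_sentence (sen : String) (key_phrase_set : List String) (context : List String) (out : (List (String × Int)) × (List (String × Int)) × (List (String × Int)) × (List (String × Int))) : Prop := out = count_key_phrases_around_context_in_preprocessed_sentence_alt sen key_phrase_set context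
instance (sen : String) (key_phrase_set : List String) (context : List String) (out : (List (String × Int)) × (List (String × Int)) × (List (String × Int)) × (List (String × Int))) : Decidable (Spec_count_key_phrases_around_context_in_preprocessed_sentence sen key_phrase_set context out) := by unfold Spec_count_key_phrases_around_context_in_preprocessed_sentence; infer_instance

-- ===== CLAIM (what is proved, stated in full; the proofs are below) =====
def Claim_equal_count_key_phrases_around_context_in_preprocessed_sentence : Prop := ∀ (sen : String) (key_phrase_set : List String) (context : List String), Dom_count_key_phrases_around_context_in_preprocessed_sentence sen key_phrase_set context → Spec_count_key_phrases_around_context_in_preprocessed_sentence sen key_phrase_set context (count_key_phrases_around_context_in_preprocessed_sentence sen key_phrase_set context)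

-- ===== LEMMAS AND PROOFS =====

-- A's inner matching loop decides equality of the corresponding window with the context.
lemma pvCtxLoopA_eq (words : List String) : ∀ (ctx : List String) (s k : Int), 0 ≤ s + k →
    pvCtxLoopA words s k ctx = decide ((words.drop (s + k).toNat).take ctx.length = ctx) := by
  intro ctx
  induction ctx with
  | nil => intro s k h; simp [pvCtxLoopA]
  | cons cw rest ih =>
    intro s k h
    rw [pvCtxLoopA, PySem.List.pyGet?_of_nonneg _ h]
    rcases hx : words[(s + k).toNat]? with _ | w
    · have hlen : words.length ≤ (s + k).toNat := by
        simpa using List.getElem?_eq_none_iff.mp hx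
      rw [List.drop_eq_nil_of_le hlen]
      simp
    · have hlt : (s + k).toNat < words.length := by
        exact List.getElem?_eq_some_iff.mp hx |>.1
      have hdrop : words.drop (s + k).toNat = words[(s + k).toNat] :: words.drop ((s + k).toNat + 1) := by
        exact List.drop_eq_getElem_cons hlt
      have hw : words[(s + k).toNat] = w := by
        have := List.getElem?_eq_some_iff.mp hx
        exact this.2
      have hnext : (s + (k + 1)).toNat = (s + k).toNat + 1 := by omega
      by_cases hcw : w = cw
      · subst hcw
        have := ih s (k + 1) (by omega)
        rw [hnext] at this
        simp [hdrop, hw, this]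
      · simp [hdrop, hw, hcw]

-- the table lookup equals A's inner loop on in-range positions
lemma pvCtxAt_lookup (words ctx : List String) (j : Int) (h0 : 0 ≤ j)
    (h1 : j + (ctx.length : Int) ≤ (words.length : Int)) :
    PySem.List.pyGetD ((PySem.List.pyRange 0 ((words.length : Int) - (ctx.length : Int) + 1) 1).map
        (fun j => PySem.List.slice words (some j) (some (j + (ctx.length : Int))) == ctx)) j false
      = pvCtxLoopA words j 0 ctx := by
  have hloop := pvCtxLoopA_eq words ctx j 0 (by omega)
  rw [PySem.List.pyGetD_of_nonneg _ _ h0]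
  rw [List.getD_eq_getElem?_getD, List.getElem?_map, PySem.List.getElem?_pyRange_one]
  have hrange : j.toNat < ((words.length : Int) - (ctx.length : Int) + 1 - 0).toNat := by omega
  rw [if_pos hrange]
  have hj : (0 : Int) + (j.toNat : Int) = j := by omega
  rw [hj]
  have htn : (j + (ctx.length : Int)).toNat - j.toNat = ctx.length := by omega
  show (PySem.List.slice words (some j) (some (j + (ctx.length : Int))) == ctx) = pvCtxLoopA words j 0 ctx
  rw [PySem.List.slice_toNat words h0 (by omega), htn]
  simp only [add_zero] at hloop
  rw [hloop]
  exact Bool.beq_eq_decide_eq _ _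

-- the two loop bodies agree on every index/word pair produced by enumerate(words)
lemma pvStep_agree (words key_phrase_set ctx : List String) (st : PVQuad) (p : Int × String)
    (h0 : 0 ≤ p.1) (h1 : p.1 < (words.length : Int)) :
    pvStepA words key_phrase_set ctx (ctx.length) (words.length) st p
      = pvStepB key_phrase_set
          ((PySem.List.pyRange 0 ((words.length : Int) - (ctx.length : Int) + 1) 1).map
            (fun j => PySem.List.slice words (some j) (some (j + (ctx.length : Int))) == ctx))
          (ctx.length) (words.length) st p := by
  obtain ⟨i, w⟩ := p
  simp only at h0 h1
  by_cases hw : w ∈ key_phrase_set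
  · simp only [pvStepA, pvStepB, hw, if_pos, PySem.Dict.modify]
    by_cases hb : (ctx.length : Int) ≤ i
    · rw [pvCtxAt_lookup words ctx (i - ctx.length) (by omega) (by omega)]
      by_cases ha : i + (ctx.length : Int) < (words.length : Int)
      · rw [pvCtxAt_lookup words ctx (i + 1) (by omega) (by omega)]
        have hg : i < (words.length : Int) - (ctx.length : Int) := by omega
        cases hL1 : pvCtxLoopA words (i - ctx.length) 0 ctx <;>
          cases hL2 : pvCtxLoopA words (i + 1) 0 ctx <;>
            simp [hb, ha, hg]
        rw [PySem.Dict.insert_insert_self]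
        have hv : st.2.1.getD w 0 + 1 + 1 = st.2.1.getD w 0 + 2 := by ring
        rw [hv]
      · have hg : ¬ i < (words.length : Int) - (ctx.length : Int) := by omega
        cases hL1 : pvCtxLoopA words (i - ctx.length) 0 ctx <;>
          simp [hb, ha, hg]
    · have hg2 : i < (words.length : Int) - (ctx.length : Int) → i + (ctx.length : Int) < (words.length : Int) := by omega
      by_cases ha : i + (ctx.length : Int) < (words.length : Int)
      · rw [pvCtxAt_lookup words ctx (i + 1) (by omega) (by omega)]
        have hg : i < (words.length : Int) - (ctx.length : Int) := by omega
        cases hL2 : pvCtxLoopA words (i + 1) 0 ctx <;>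
          simp [hb, ha, hg]
      · have hg : ¬ i < (words.length : Int) - (ctx.length : Int) := by omega
        simp [hb, ha, hg]
  · simp [pvStepA, pvStepB, hw]

-- ===== VERDICT (by name: the statement is the Claim_ definition above) =====
theorem count_key_phrases_around_context_in_preprocessed_sentence_spec : Claim_equal_count_key_phrases_around_context_in_preprocessed_sentence := by
  intro sen key_phrase_set context _
  unfold Spec_count_key_phrases_around_context_in_preprocessed_sentence
  unfold count_key_phrases_around_context_in_preprocessed_sentence
    count_key_phrases_around_context_in_preprocessed_sentence_alt
  simp only []
  rw [PySem.List.foldl_congr_mem _ _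
    (pvStepB key_phrase_set
      ((PySem.List.pyRange 0 ((((PySem.Str.split? sen " ").getD []).length : Int) - (context.length : Int) + 1) 1).map
        (fun j => PySem.List.slice ((PySem.Str.split? sen " ").getD []) (some j) (some (j + (context.length : Int))) == context))
      (context.length) (((PySem.Str.split? sen " ").getD []).length)) _ ?_]
  intro acc p hp
  rcases (PySem.List.mem_enumerate_iff _ _ _).mp hp with ⟨k, hk, hpk⟩
  subst hpk
  exact pvStep_agree _ key_phrase_set context acc _ (by simp) (by simpa using hk)
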